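-- pv_equiv track=rewrite | github.com/Safe-RL-Team/viper-verifiable-rl-impl | gym_env/pong_wrapper.py | estimate_ball_velocity
-- ===== SOURCE A (Python) =====
-- def estimate_ball_velocity(last_states):
--     if len(last_states) < 2:
--         return [[0, 0]]
--
--     last = None
--     speeds = []
--     for state in last_states:
--         ball_x = state[4]
--         ball_y = state[5]
--         if last is None:
--             last = [ball_x, ball_y]
--             continue
--
--         speeds.append([ball_x - last[0], ball_y - last[1]])
--         last = [ball_x, ball_y]
--
--     return speeds
-- ===== SOURCE B (Python) =====
-- def estimate_ball_velocity(last_states):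
--     if len(last_states) < 2:
--         return [[0, 0]]
--     # Stage 1: project the two ball coordinates into separate column lists (SoA layout).
--     xs = [s[4] for s in last_states]
--     ys = [s[5] for s in last_states]
--     # Stage 2: adjacent differences of a single column, computed recursively.
--     def diff(col):
--         if len(col) < 2:
--             return []
--         return [col[1] - col[0]] + diff(col[1:])
--     # Stage 3: transpose the two difference columns back into [dx, dy] rows.
--     return [[dx, dy] for dx, dy in zip(diff(xs), diff(ys))]
-- ===== Notes on version B (the rewrite author's own statement) =====
-- stated objective: alternative
-- what changed: Replaces A's single row-wise pass with a previous-state accumulator by a staged column-oriented computation: project the x and y coordinates into two column lists, compute each column's adjacent differences with a recursive helper, then transpose the two difference columns into rows.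
import Mathlib
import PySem

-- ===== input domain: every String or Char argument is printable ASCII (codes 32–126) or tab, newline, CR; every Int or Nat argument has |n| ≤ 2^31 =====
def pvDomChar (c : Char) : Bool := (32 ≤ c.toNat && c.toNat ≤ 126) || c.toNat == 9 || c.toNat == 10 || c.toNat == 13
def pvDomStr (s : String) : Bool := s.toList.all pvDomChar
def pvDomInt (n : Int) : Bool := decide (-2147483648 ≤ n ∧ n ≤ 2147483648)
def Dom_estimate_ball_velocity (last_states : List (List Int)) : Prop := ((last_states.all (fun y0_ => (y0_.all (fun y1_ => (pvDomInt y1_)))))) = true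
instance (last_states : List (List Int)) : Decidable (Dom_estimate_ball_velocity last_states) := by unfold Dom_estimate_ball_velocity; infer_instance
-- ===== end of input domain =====

-- B replaces A's row-wise accumulator loop by staged column-oriented passes (project columns, recursive adjacent differences, transpose); return values proved equal on Pre_.

-- ===== PORT A =====
-- state[4]/state[5] are ported with pyGetD (default 0); Pre_ excludes the states on which Python would raise IndexError.
def estimate_ball_velocity (last_states : List (List Int)) : List (List Int) :=
  if last_states.length < 2 then [[0, 0]]
  else
    (last_states.foldl
      (fun (acc : Option (Int × Int) × List (List Int)) state =>
        let ball_x := PySem.List.pyGetD state 4 0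
        let ball_y := PySem.List.pyGetD state 5 0
        match acc.1 with
        | none => (some (ball_x, ball_y), acc.2)
        | some (lx, ly) => (some (ball_x, ball_y), acc.2 ++ [[ball_x - lx, ball_y - ly]]))
      (none, [])).2

-- ===== PORT B =====
-- B's recursive adjacent-differences helper 'diff'.
def pvDiff : List Int → List Int
  | a :: b :: rest => (b - a) :: pvDiff (b :: rest)
  | _ => []

def estimate_ball_velocity_alt (last_states : List (List Int)) : List (List Int) :=
  if last_states.length < 2 then [[0, 0]]
  else
    let xs := last_states.map (fun s => PySem.List.pyGetD s 4 0)
    let ys := last_states.map (fun s => PySem.List.pyGetD s 5 0)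
    ((pvDiff xs).zip (pvDiff ys)).map (fun d => [d.1, d.2])

-- ===== PRECONDITION & SPEC =====
-- Pre_ excludes exactly the inputs where Python A raises IndexError: with ≥ 2 states, some state shorter than 6.
def Pre_estimate_ball_velocity (last_states : List (List Int)) : Prop :=
  last_states.length < 2 ∨ ∀ s ∈ last_states, 6 ≤ s.length
instance (last_states : List (List Int)) : Decidable (Pre_estimate_ball_velocity last_states) := by unfold Pre_estimate_ball_velocity; infer_instance

def pvWitness_estimate_ball_velocity : List (List Int) := [[0,0,0,0,1,2],[0,0,0,0,3,5]]

def Spec_estimate_ball_velocity (last_states : List (List Int)) (out : List (List Int)) : Prop := out = estimate_ball_velocity_alt last_states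
instance (last_states : List (List Int)) (out : List (List Int)) : Decidable (Spec_estimate_ball_velocity last_states out) := by unfold Spec_estimate_ball_velocity; infer_instance

-- ===== CLAIM (what is proved, stated in full; the proofs are below) =====
def Claim_equal_estimate_ball_velocity : Prop := ∀ (last_states : List (List Int)), Dom_estimate_ball_velocity last_states → Pre_estimate_ball_velocity last_states → Spec_estimate_ball_velocity last_states (estimate_ball_velocity last_states)

-- ===== LEMMAS AND PROOFS =====

-- A's loop body, named for the induction.
def pvStepA (acc : Option (Int × Int) × List (List Int)) (state : List Int) : Option (Int × Int) × List (List Int) :=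
  let ball_x := PySem.List.pyGetD state 4 0
  let ball_y := PySem.List.pyGetD state 5 0
  match acc.1 with
  | none => (some (ball_x, ball_y), acc.2)
  | some (lx, ly) => (some (ball_x, ball_y), acc.2 ++ [[ball_x - lx, ball_y - ly]])

lemma pvFold_aux : ∀ (rest : List (List Int)) (p : List Int) (acc : List (List Int)),
    (List.foldl pvStepA (some (PySem.List.pyGetD p 4 0, PySem.List.pyGetD p 5 0), acc) rest).2
    = acc ++ ((pvDiff ((p :: rest).map (fun s => PySem.List.pyGetD s 4 0))).zip
              (pvDiff ((p :: rest).map (fun s => PySem.List.pyGetD s 5 0)))).map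
        (fun d => [d.1, d.2]) := by
  intro rest
  induction rest with
  | nil => intro p acc; simp [pvDiff]
  | cons c rest ih =>
    intro p acc
    have h1 : pvStepA (some (PySem.List.pyGetD p 4 0, PySem.List.pyGetD p 5 0), acc) c
        = (some (PySem.List.pyGetD c 4 0, PySem.List.pyGetD c 5 0),
           acc ++ [[PySem.List.pyGetD c 4 0 - PySem.List.pyGetD p 4 0,
                    PySem.List.pyGetD c 5 0 - PySem.List.pyGetD p 5 0]]) := rfl
    simp only [List.foldl_cons, h1, ih]
    simp [pvDiff, List.zip]

-- ===== VERDICT (by name: the statement is the Claim_ definition above) =====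
theorem estimate_ball_velocity_spec : Claim_equal_estimate_ball_velocity := by
  intro last_states _ _
  unfold Spec_estimate_ball_velocity estimate_ball_velocity estimate_ball_velocity_alt
  split
  · rfl
  · cases last_states with
    | nil => rfl
    | cons s rest =>
      have h0 : pvStepA (none, ([] : List (List Int))) s
          = (some (PySem.List.pyGetD s 4 0, PySem.List.pyGetD s 5 0), []) := rfl
      show (List.foldl pvStepA (none, []) (s :: rest)).2 = _
      simp only [List.foldl_cons, h0, pvFold_aux rest s []]
      simp
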